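-- pv_equiv track=rewrite | github.com/bisayaDev/SMS-Blaster | helper.py | group_data_by
-- ===== SOURCE A (Python) =====
-- def group_data_by(data, n):
--     items_per_group, extras = divmod(len(data), n)
--
--     # Prepare the output list
--     result = []
--     start = 0
--
--     for i in range(n):
--         # Calculate the number of items for the current group
--         end = start + items_per_group + (1 if i < extras else 0)
--         # Append the current slice of data to the result list
--         result.append(data[start:end])
--         # Update the start index for the next group
--         start = end
--
--     return result
-- ===== SOURCE B (Python) =====
-- def group_data_by(data, n):
--     q, extras = divmod(len(data), n)
--     it = iter(data)
--     return [[next(it) for _ in range(q + (1 if i < extras else 0))]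
--             for i in range(n)]
-- ===== Notes on version B (the rewrite author's own statement) =====
-- stated objective: alternative
-- what changed: Instead of computing start/end boundaries and appending slices, B pulls elements off a single shared iterator: each group is materialised by consuming its quota of elements, with no index arithmetic and no slicing.
import Mathlib
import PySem

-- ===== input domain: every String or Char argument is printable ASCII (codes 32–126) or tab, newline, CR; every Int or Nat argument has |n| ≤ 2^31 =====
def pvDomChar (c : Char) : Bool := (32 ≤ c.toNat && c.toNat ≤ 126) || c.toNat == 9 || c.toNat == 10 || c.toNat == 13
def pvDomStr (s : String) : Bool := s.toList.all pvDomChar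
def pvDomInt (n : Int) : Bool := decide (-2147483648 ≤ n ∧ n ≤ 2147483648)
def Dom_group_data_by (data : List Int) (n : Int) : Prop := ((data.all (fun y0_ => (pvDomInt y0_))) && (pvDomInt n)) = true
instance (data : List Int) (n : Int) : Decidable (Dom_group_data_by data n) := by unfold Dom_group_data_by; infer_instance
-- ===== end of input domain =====

-- B consumes a single shared iterator, each group pulling its quota of elements; no index arithmetic or slicing (alternative mechanism, same cost).

-- ===== PORT A =====
-- A: divmod, then a loop over range(n) threading (result, start).
def group_data_by (data : List Int) (n : Int) : List (List Int) :=
  let items_per_group := PySem.Int.floordiv (data.length : Int) n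
  let extras := PySem.Int.mod (data.length : Int) n
  ((PySem.List.pyRange 0 n 1).foldl
    (fun (st : List (List Int) × Int) i =>
      let e := st.2 + items_per_group + (if i < extras then (1 : Int) else 0)
      (st.1 ++ [PySem.List.slice data (some st.2) (some e)], e))
    ([], 0)).1

-- ===== PORT B =====
-- B-side helper: the comprehension '[next(it) for _ in range(size_i)] for i in range(n)]',
-- the shared iterator carried as the not-yet-consumed suffix 'rem'.
def pvTakeGroups (q ex : Int) : List Int → List Int → List (List Int)
  | [], _ => []
  | i :: is, rem =>
      let k := q + (if i < ex then (1 : Int) else 0)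
      (rem.take k.toNat) :: pvTakeGroups q ex is (rem.drop k.toNat)

-- B: divmod, then each group pulls q (+1 for the first extras) elements off the iterator.
def group_data_by_alt (data : List Int) (n : Int) : List (List Int) :=
  let q := PySem.Int.floordiv (data.length : Int) n
  let ex := PySem.Int.mod (data.length : Int) n
  pvTakeGroups q ex (PySem.List.pyRange 0 n 1) data

-- ===== PRECONDITION & SPEC =====
-- Pre_ excludes exactly n = 0, where A's divmod raises ZeroDivisionError.
def Pre_group_data_by (data : List Int) (n : Int) : Prop := n ≠ 0
instance (data : List Int) (n : Int) : Decidable (Pre_group_data_by data n) := by unfold Pre_group_data_by; infer_instance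
def pvWitness_group_data_by : List Int × Int := ([1, 2, 3, 4, 5], 2)

def Spec_group_data_by (data : List Int) (n : Int) (out : List (List Int)) : Prop := out = group_data_by_alt data n
instance (data : List Int) (n : Int) (out : List (List Int)) : Decidable (Spec_group_data_by data n out) := by unfold Spec_group_data_by; infer_instance

-- ===== CLAIM =====
def Claim_equal_group_data_by : Prop := ∀ (data : List Int) (n : Int), Dom_group_data_by data n → Pre_group_data_by data n → Spec_group_data_by data n (group_data_by data n)

-- ===== LEMMAS AND PROOFS =====

-- common closed form: group i spans [pvStart q ex i, pvStart q ex (i+1))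
def pvStart (q ex i : Int) : Int := i * q + min i ex

def pvClosed (data : List Int) (n : Int) : List (List Int) :=
  let q := PySem.Int.floordiv (data.length : Int) n
  let ex := PySem.Int.mod (data.length : Int) n
  (PySem.List.pyRange 0 n 1).map
    (fun i => PySem.List.slice data (some (pvStart q ex i)) (some (pvStart q ex (i + 1))))

lemma pvStart_step (q ex i : Int) :
    pvStart q ex i + q + (if i < ex then (1 : Int) else 0) = pvStart q ex (i + 1) := by
  unfold pvStart
  rcases lt_or_ge i ex with h | h
  · simp only [if_pos h]
    rw [min_eq_left (by omega), min_eq_left (by omega)]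
    ring
  · simp only [if_neg (not_lt.mpr h)]
    rw [min_eq_right (by omega), min_eq_right (by omega)]
    ring

-- A's fold over range k: result is the closed-form prefix, start = pvStart q ex k.
lemma pv_fold_invariant (data : List Int) (q ex : Int) (hex : 0 ≤ ex) (k : Nat) :
    ((PySem.List.pyRange 0 (k : Int) 1).foldl
      (fun (st : List (List Int) × Int) i =>
        let e := st.2 + q + (if i < ex then (1 : Int) else 0)
        (st.1 ++ [PySem.List.slice data (some st.2) (some e)], e))
      ([], 0))
    = ((PySem.List.pyRange 0 (k : Int) 1).map
        (fun i => PySem.List.slice data (some (pvStart q ex i)) (some (pvStart q ex (i + 1)))),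
       pvStart q ex (k : Int)) := by
  induction k with
  | zero =>
    simp [PySem.List.pyRange_one_eq_nil, pvStart]
    omega
  | succ m ih =>
    have hm : (0 : Int) ≤ (m : Int) := by positivity
    have hr : PySem.List.pyRange 0 ((m : Int) + 1) 1
        = PySem.List.pyRange 0 (m : Int) 1 ++ [(m : Int)] :=
      PySem.List.pyRange_one_succ_right hm
    push_cast
    rw [hr, List.foldl_append, List.map_append, ih]
    simp only [List.foldl_cons, List.foldl_nil, List.map_cons, List.map_nil]
    rw [pvStart_step q ex (m : Int)]

lemma pv_a_eq_closed (data : List Int) (n : Int) (hn : n ≠ 0) :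
    group_data_by data n = pvClosed data n := by
  unfold group_data_by pvClosed
  rcases lt_or_gt_of_ne hn with hneg | hpos
  · rw [PySem.List.pyRange_one_eq_nil (by omega)]
    simp
  · have hex : 0 ≤ PySem.Int.mod (data.length : Int) n := by
      rw [PySem.Int.mod_eq_emod_of_pos hpos]
      exact Int.emod_nonneg _ (by omega)
    obtain ⟨k, hk⟩ : ∃ k : Nat, n = (k : Int) := ⟨n.toNat, by omega⟩
    subst hk
    have := pv_fold_invariant data (PySem.Int.floordiv (data.length : Int) (k : Int))
      (PySem.Int.mod (data.length : Int) (k : Int)) hex k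
    simp only [this]

-- Nat-level start function
def pvStartN (q ex i : Nat) : Nat := i * q + min i ex

lemma pvStart_natCast (q ex i : Nat) : pvStart (q : Int) (ex : Int) (i : Int) = (pvStartN q ex i : Int) := by
  unfold pvStart pvStartN
  push_cast
  ring_nf

-- B's iterator consumption over range(j, j+k), started at suffix position pvStartN q ex j,
-- yields the closed-form groups of that range.
lemma pv_tg (data : List Int) (q ex : Nat) :
    ∀ (k j : Nat),
    pvTakeGroups (q : Int) (ex : Int) (PySem.List.pyRange (j : Int) ((j : Int) + (k : Int)) 1)
        (data.drop (pvStartN q ex j))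
    = (PySem.List.pyRange (j : Int) ((j : Int) + (k : Int)) 1).map
        (fun i => PySem.List.slice data (some (pvStart (q : Int) (ex : Int) i))
          (some (pvStart (q : Int) (ex : Int) (i + 1)))) := by
  intro k
  induction k with
  | zero =>
    intro j
    rw [show (j : Int) + ((0 : Nat) : Int) = (j : Int) from by push_cast; ring]
    rw [PySem.List.pyRange_one_eq_nil (le_refl _)]
    rfl
  | succ k ih =>
    intro j
    rw [PySem.List.pyRange_one_cons (by push_cast; omega : (j : Int) < (j : Int) + ((k+1 : Nat) : Int))]
    rw [List.map_cons]
    simp only [pvTakeGroups]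
    have p1 : (j + 1) * q = j * q + q := by ring
    have hk0 : ((q : Int) + if (j : Int) < (ex : Int) then (1 : Int) else 0).toNat
        = pvStartN q ex (j + 1) - pvStartN q ex j := by
      by_cases h : j < ex
      · rw [if_pos (by exact_mod_cast h)]
        unfold pvStartN; omega
      · rw [if_neg (by exact_mod_cast h)]
        unfold pvStartN; omega
    congr 1
    · -- the group pulled here is the closed-form slice
      rw [show (j : Int) + 1 = ((j + 1 : Nat) : Int) from by push_cast; ring]
      rw [pvStart_natCast, pvStart_natCast, PySem.List.slice_natCast, hk0]
    · -- the rest: remaining suffix starts at pvStartN q ex (j+1)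
      rw [List.drop_drop, hk0]
      have hsuf : pvStartN q ex j + (pvStartN q ex (j + 1) - pvStartN q ex j) = pvStartN q ex (j + 1) := by
        unfold pvStartN; omega
      rw [hsuf]
      have hr1 : (j : Int) + 1 = ((j + 1 : Nat) : Int) := by push_cast; ring
      have hr2 : (j : Int) + ((k + 1 : Nat) : Int) = ((j + 1 : Nat) : Int) + ((k : Nat) : Int) := by
        push_cast; ring
      rw [hr1, hr2]
      exact ih (j + 1)

-- B equals the closed form for every natural n (both are [] at n = 0).
lemma pv_alt_closed (m : Nat) (data : List Int) :
    group_data_by_alt data (m : Int) = pvClosed data (m : Int) := by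
  unfold group_data_by_alt pvClosed
  rw [show PySem.Int.floordiv (data.length : Int) ((m : Nat) : Int) = ((data.length / m : Nat) : Int) from
    PySem.Int.floordiv_natCast _ _]
  rw [show PySem.Int.mod (data.length : Int) ((m : Nat) : Int) = ((data.length % m : Nat) : Int) from
    PySem.Int.mod_natCast _ _]
  have h0 : ((m : Nat) : Int) = ((0 : Nat) : Int) + ((m : Nat) : Int) := by push_cast; ring
  have hd : data = data.drop (pvStartN (data.length / m) (data.length % m) 0) := by
    unfold pvStartN; simp
  rw [show (0 : Int) = ((0 : Nat) : Int) from rfl] at *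
  calc pvTakeGroups _ _ (PySem.List.pyRange ((0:Nat) : Int) ((m : Nat) : Int) 1) data
      = pvTakeGroups _ _ (PySem.List.pyRange ((0:Nat) : Int) (((0:Nat) : Int) + ((m : Nat) : Int)) 1)
          (data.drop (pvStartN (data.length / m) (data.length % m) 0)) := by
        rw [← h0, ← hd]
    _ = _ := by
        rw [pv_tg data (data.length / m) (data.length % m) m 0, ← h0]

lemma pv_main (data : List Int) (n : Int) (hn : n ≠ 0) :
    group_data_by data n = group_data_by_alt data n := by
  rw [pv_a_eq_closed data n hn]
  rcases lt_or_gt_of_ne hn with hneg | hpos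
  · unfold group_data_by_alt pvClosed
    rw [PySem.List.pyRange_one_eq_nil (by omega)]
    rfl
  · obtain ⟨k, hk⟩ : ∃ k : Nat, n = (k : Int) := ⟨n.toNat, by omega⟩
    subst hk
    exact (pv_alt_closed k data).symm

-- ===== VERDICT =====
theorem group_data_by_spec : Claim_equal_group_data_by := by
  intro data n _ hn
  unfold Spec_group_data_by
  exact pv_main data n hn
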